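-- pv_equiv track=rewrite | github.com/N-damo/wgsreport | script/autostat/pyCNV.py | stat_length_distribution
-- ===== SOURCE A (Python) =====
-- def stat_length_distribution(length_dis):
--     a={}
--     a['>1k']=0
--     a['>5k']=0
--     a['>10k']=0
--     a['>100k']=0
--     a['>1000k']=0
--     if len(length_dis) == 0:
--         return a['>1k'],a['>5k'],a['>10k'],a['>100k'],a['>1000k']
--     else:
--         for i in length_dis:
--             kb = i/1000
--             if kb > 1:
--                 a['>1k'] += 1
--             if kb > 5:
--                 a['>5k'] += 1
--             if kb > 10:
--                 a['>10k'] += 1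
--             if kb > 100:
--                 a['>100k'] += 1
--             if kb > 1000:
--                 a['>1000k'] += 1
--         return a['>1k'],a['>5k'],a['>10k'],a['>100k'],a['>1000k']
-- ===== SOURCE B (Python) =====
-- def _count_gt(s, t):
--     # s sorted ascending; number of elements strictly greater than t,
--     # via binary search for the first index whose element exceeds t
--     lo, hi = 0, len(s)
--     while lo < hi:
--         mid = (lo + hi) // 2
--         if s[mid] <= t:
--             lo = mid + 1
--         else:
--             hi = mid
--     return len(s) - lo
--
--
-- def stat_length_distribution(length_dis):
--     s = sorted(length_dis)
--     return (_count_gt(s, 1000), _count_gt(s, 5000), _count_gt(s, 10000),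
--             _count_gt(s, 100000), _count_gt(s, 1000000))
-- ===== Notes on version B (the rewrite author's own statement) =====
-- stated objective: alternative
-- what changed: Replaces the per-element five-comparison dict-counter pass with sort-once then one binary search per threshold (count = len - bisect_right position), computed over the sorted list.
import Mathlib
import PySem

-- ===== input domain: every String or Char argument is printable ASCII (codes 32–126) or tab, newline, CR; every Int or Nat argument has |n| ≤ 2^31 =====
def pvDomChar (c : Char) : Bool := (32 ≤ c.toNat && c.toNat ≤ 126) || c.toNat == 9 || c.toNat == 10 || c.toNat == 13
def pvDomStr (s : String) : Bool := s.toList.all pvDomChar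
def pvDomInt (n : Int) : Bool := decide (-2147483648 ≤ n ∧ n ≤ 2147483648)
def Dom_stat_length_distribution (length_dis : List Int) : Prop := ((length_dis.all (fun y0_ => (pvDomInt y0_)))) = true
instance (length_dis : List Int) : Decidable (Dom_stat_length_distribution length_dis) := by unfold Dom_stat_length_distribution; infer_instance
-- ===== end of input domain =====

-- B replaces A's per-element five-comparison counting pass by sort-once plus one
-- binary search per threshold (alternative decomposition; return value identical).

-- ===== PORT A =====
-- Python's kb = i/1000 is float true division; for |i| ≤ 2^31 the comparison
-- kb > t (t ∈ {1,5,10,100,1000}) is exactly i > 1000*t (the quotient's rounding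
-- error is far below the distance to the threshold except at i = 1000*t, where
-- the quotient is exact), so the dict's five counters are ported as five Int
-- components updated by the same ordered branches.
def stepA (a : Int × Int × Int × Int × Int) (i : Int) : Int × Int × Int × Int × Int :=
  let a := if 1000 < i then (a.1 + 1, a.2.1, a.2.2.1, a.2.2.2.1, a.2.2.2.2) else a
  let a := if 5000 < i then (a.1, a.2.1 + 1, a.2.2.1, a.2.2.2.1, a.2.2.2.2) else a
  let a := if 10000 < i then (a.1, a.2.1, a.2.2.1 + 1, a.2.2.2.1, a.2.2.2.2) else a
  let a := if 100000 < i then (a.1, a.2.1, a.2.2.1, a.2.2.2.1 + 1, a.2.2.2.2) else a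
  let a := if 1000000 < i then (a.1, a.2.1, a.2.2.1, a.2.2.2.1, a.2.2.2.2 + 1) else a
  a

def stat_length_distribution (length_dis : List Int) : Int × Int × Int × Int × Int :=
  let a : Int × Int × Int × Int × Int := (0, 0, 0, 0, 0)
  if length_dis.length == 0 then a
  else length_dis.foldl stepA a

-- ===== PORT B =====
-- Source B's hand-written bisect loop; s[mid] is ported with getD 0, exact because every
-- call keeps 0 ≤ lo ≤ mid < hi ≤ len(s).
def bsLoop (s : List Int) (t : Int) (lo hi : Nat) : Nat :=
  if h : lo < hi then
    let mid := (lo + hi) / 2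
    if s.getD mid 0 ≤ t then bsLoop s t (mid + 1) hi else bsLoop s t lo mid
  else lo
termination_by hi - lo
decreasing_by all_goals omega

def countGt (s : List Int) (t : Int) : Int :=
  (s.length : Int) - (bsLoop s t 0 s.length : Int)

def stat_length_distribution_alt (length_dis : List Int) : Int × Int × Int × Int × Int :=
  let s := PySem.List.sorted length_dis (fun x => x) false
  (countGt s 1000, countGt s 5000, countGt s 10000, countGt s 100000, countGt s 1000000)

-- ===== PRECONDITION & SPEC =====
def Spec_stat_length_distribution (length_dis : List Int) (out : Int × Int × Int × Int × Int) : Prop := out = stat_length_distribution_alt length_dis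
instance (length_dis : List Int) (out : Int × Int × Int × Int × Int) : Decidable (Spec_stat_length_distribution length_dis out) := by unfold Spec_stat_length_distribution; infer_instance

-- ===== CLAIM (what is proved, stated in full; the proofs are below) =====
def Claim_equal_stat_length_distribution : Prop := ∀ (length_dis : List Int), Dom_stat_length_distribution length_dis → Spec_stat_length_distribution length_dis (stat_length_distribution length_dis)

-- ===== LEMMAS AND PROOFS =====

theorem stepA_eq (a : Int × Int × Int × Int × Int) (i : Int) :
    stepA a i = (a.1 + (if 1000 < i then 1 else 0),
                 a.2.1 + (if 5000 < i then 1 else 0),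
                 a.2.2.1 + (if 10000 < i then 1 else 0),
                 a.2.2.2.1 + (if 100000 < i then 1 else 0),
                 a.2.2.2.2 + (if 1000000 < i then 1 else 0)) := by
  unfold stepA
  split_ifs <;> simp

-- A's fold computes the five strict-threshold counts, shifted by the accumulator.
theorem foldA_counts (l : List Int) (a : Int × Int × Int × Int × Int) :
    l.foldl stepA a
    = (a.1 + (l.countP (fun i => 1000 < i) : Int),
       a.2.1 + (l.countP (fun i => 5000 < i) : Int),
       a.2.2.1 + (l.countP (fun i => 10000 < i) : Int),
       a.2.2.2.1 + (l.countP (fun i => 100000 < i) : Int),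
       a.2.2.2.2 + (l.countP (fun i => 1000000 < i) : Int)) := by
  induction l generalizing a with
  | nil => simp
  | cons x xs ih =>
    rw [List.foldl_cons, ih, stepA_eq]
    refine Prod.ext ?_ (Prod.ext ?_ (Prod.ext ?_ (Prod.ext ?_ ?_))) <;>
      dsimp only <;> rw [List.countP_cons] <;> push_cast <;>
      split_ifs <;> simp_all <;> omega

-- the bisect loop lands on the boundary index: everything before it is ≤ t,
-- everything from it on (below hi) is > t.
theorem bsLoop_char (s : List Int) (t : Int)
    (hsort : ∀ i j : Nat, i ≤ j → j < s.length → s.getD i 0 ≤ s.getD j 0) :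
    ∀ (n lo hi : Nat), hi - lo ≤ n → lo ≤ hi → hi ≤ s.length →
      lo ≤ bsLoop s t lo hi ∧ bsLoop s t lo hi ≤ hi ∧
      (∀ j : Nat, lo ≤ j → j < bsLoop s t lo hi → s.getD j 0 ≤ t) ∧
      (∀ j : Nat, bsLoop s t lo hi ≤ j → j < hi → t < s.getD j 0) := by
  intro n
  induction n with
  | zero =>
    intro lo hi hd hlohi hhi
    have : lo = hi := by omega
    subst this
    rw [bsLoop]
    simp only [lt_irrefl, dif_neg, not_false_iff]
    exact ⟨le_refl _, le_refl _, by omega, by omega⟩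
  | succ n ih =>
    intro lo hi hd hlohi hhi
    rw [bsLoop]
    by_cases h : lo < hi
    · simp only [h, dif_pos]
      have hm1 : lo ≤ (lo + hi) / 2 := by omega
      have hm2 : (lo + hi) / 2 < hi := by omega
      by_cases hle : s.getD ((lo + hi) / 2) 0 ≤ t
      · simp only [hle, if_pos]
        obtain ⟨c1, c2, c3, c4⟩ :=
          ih ((lo + hi) / 2 + 1) hi (by omega) (by omega) hhi
        refine ⟨by omega, c2, ?_, c4⟩
        intro j hj1 hj2
        by_cases hjm : j ≤ (lo + hi) / 2
        · exact le_trans (hsort j ((lo + hi) / 2) hjm (by omega)) hle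
        · exact c3 j (by omega) hj2
      · simp only [hle, if_neg, not_false_iff]
        obtain ⟨c1, c2, c3, c4⟩ :=
          ih lo ((lo + hi) / 2) (by omega) (by omega) (by omega)
        refine ⟨c1, by omega, c3, ?_⟩
        intro j hj1 hj2
        by_cases hjm : j < (lo + hi) / 2
        · exact c4 j hj1 hjm
        · have hmj : (lo + hi) / 2 ≤ j := by omega
          have h1 : t < s.getD ((lo + hi) / 2) 0 := by omega
          exact lt_of_lt_of_le h1 (hsort _ j hmj (by omega))
    · simp only [h, dif_neg, not_false_iff]
      exact ⟨le_refl _, by omega, by omega, by omega⟩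

-- an index characterisation pins down countP
theorem countP_eq_of_boundary (t : Int) :
    ∀ (s : List Int) (r : Nat), r ≤ s.length →
      (∀ j : Nat, j < r → s.getD j 0 ≤ t) →
      (∀ j : Nat, r ≤ j → j < s.length → t < s.getD j 0) →
      s.countP (fun x => decide (x ≤ t)) = r := by
  intro s
  induction s with
  | nil =>
    intro r hr _ _
    simp only [List.countP_nil, List.length_nil] at *
    omega
  | cons x xs ih =>
    intro r hr hlo hhi
    cases r with
    | zero =>
      rw [List.countP_eq_zero]
      intro y hy
      obtain ⟨j, hj, hjy⟩ := List.getElem_of_mem hy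
      have := hhi j (by omega) hj
      rw [List.getD_eq_getElem _ _ hj, hjy] at this
      simpa using by omega
    | succ r' =>
      have hx : x ≤ t := by
        have := hlo 0 (by omega)
        simpa using this
      rw [List.countP_cons]
      have hxs : xs.countP (fun x => decide (x ≤ t)) = r' := by
        apply ih r' (by simp at hr; omega)
        · intro j hj
          have := hlo (j + 1) (by omega)
          simpa using this
        · intro j hj1 hj2
          have := hhi (j + 1) (by omega) (by simp; omega)
          simpa using this
      simp [hx, hxs]

theorem countGt_eq (l : List Int) (t : Int) :
    countGt (PySem.List.sorted l (fun x => x) false) t = (l.countP (fun i => t < i) : Int) := by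
  have hperm : (PySem.List.sorted l (fun x => x) false).Perm l :=
    PySem.List.sorted_perm l (fun x => x) false
  have hpw : (PySem.List.sorted l (fun x => x) false).Pairwise (fun a b => a ≤ b) := by
    simpa using PySem.List.sorted_pairwise l (fun x => x)
  generalize hsdef : PySem.List.sorted l (fun x => x) false = s at *
  have hsort : ∀ i j : Nat, i ≤ j → j < s.length → s.getD i 0 ≤ s.getD j 0 := by
    intro i j hij hj
    rw [List.getD_eq_getElem _ _ (by omega), List.getD_eq_getElem _ _ hj]
    rcases Nat.lt_or_ge i j with hlt | hge
    · exact (List.pairwise_iff_getElem.mp hpw) i j (by omega) hj hlt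
    · have : i = j := by omega
      subst this; exact le_refl _
  obtain ⟨h1, h2, h3, h4⟩ :=
    bsLoop_char s t hsort s.length 0 s.length (by omega) (by omega) (le_refl _)
  have hcount : s.countP (fun x => decide (x ≤ t)) = bsLoop s t 0 s.length :=
    countP_eq_of_boundary t s _ h2 (fun j hj => h3 j (by omega) hj) h4
  have hsplit : s.countP (fun x => decide (x ≤ t)) + s.countP (fun x => decide (t < x)) = s.length := by
    have hh := List.length_eq_countP_add_countP (l := s) (p := fun x => decide (x ≤ t))
    rw [hh]
    congr 1
    apply List.countP_congr
    intro x _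
    simp
  have hpc : s.countP (fun x => decide (t < x)) = l.countP (fun i => t < i) := by
    simpa using hperm.countP_eq (p := fun x => decide (t < x))
  unfold countGt
  omega

-- ===== VERDICT (by name: the statement is the Claim_ definition above) =====
theorem stat_length_distribution_spec : Claim_equal_stat_length_distribution := by
  intro l _
  unfold Spec_stat_length_distribution stat_length_distribution stat_length_distribution_alt
  by_cases hnil : l.length = 0
  · have : l = [] := List.length_eq_zero_iff.mp hnil
    subst this
    simp [countGt_eq]
  · simp only [hnil, beq_iff_eq, if_neg, not_false_iff]
    rw [foldA_counts, countGt_eq, countGt_eq, countGt_eq, countGt_eq, countGt_eq]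
    simp
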